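-- pv_equiv track=rewrite | github.com/RTruben/lm-evaluation-harness-czech | lm_eval/models/utils.py | truncate_token_segments_from_left
-- ===== SOURCE A (Python) =====
-- from typing import (
--     Any,
--     Callable,
--     Dict,
--     Iterable,
--     Iterator,
--     List,
--     Literal,
--     Optional,
--     Tuple,
--     Type,
--     Union,
-- )
--
-- def truncate_token_segments_from_left(segments: List[List[int]], max_length: int) -> List[List[int]]:
--     """
--     Truncates a list of token segments from the left to the specified maximum length.
--
--     Parameters:
--     - segments (List[List[int]]): The list of token segments to be truncated.
--     - max_length (int): The maximum length of the segments.
--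
--     Returns:
--     List[List[int]]: The list of token segments truncated to the specified maximum length.
--     """
--     new_segmented_tokens = []
--     new_length = 0
--     for segment in reversed(segments):
--         new_length += len(segment)
--         if new_length <= max_length:  # we can add the whole segment
--             new_segmented_tokens.append(segment)
--         elif new_length - len(segment) < max_length:  # we can add part of the segment
--             rest_of_space = max_length - (new_length - len(segment))
--             new_segmented_tokens.append(segment[-rest_of_space:])
--             break
--         else:
--             break
--
--     return list(reversed(new_segmented_tokens))
-- ===== SOURCE B (Python) =====
-- def truncate_token_segments_from_left(segments, max_length):
--     # One forward pass: find the cut point using the running suffix total,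
--     # then build segments[i:] with an optional partial first segment.
--     total = sum(len(s) for s in segments)
--     i = 0
--     while i < len(segments) and total > max_length:
--         total -= len(segments[i])
--         i += 1
--     result = segments[i:]
--     if i > 0 and total < max_length:
--         result.insert(0, segments[i - 1][-(max_length - total):])
--     return result
-- ===== Notes on version B (the rewrite author's own statement) =====
-- stated objective: alternative
-- what changed: Replaces the reversed streaming loop that appends kept segments and breaks with a forward cut-point search over the running suffix total, then builds the result as a list slice plus an optional partial first segment.
import Mathlib
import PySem

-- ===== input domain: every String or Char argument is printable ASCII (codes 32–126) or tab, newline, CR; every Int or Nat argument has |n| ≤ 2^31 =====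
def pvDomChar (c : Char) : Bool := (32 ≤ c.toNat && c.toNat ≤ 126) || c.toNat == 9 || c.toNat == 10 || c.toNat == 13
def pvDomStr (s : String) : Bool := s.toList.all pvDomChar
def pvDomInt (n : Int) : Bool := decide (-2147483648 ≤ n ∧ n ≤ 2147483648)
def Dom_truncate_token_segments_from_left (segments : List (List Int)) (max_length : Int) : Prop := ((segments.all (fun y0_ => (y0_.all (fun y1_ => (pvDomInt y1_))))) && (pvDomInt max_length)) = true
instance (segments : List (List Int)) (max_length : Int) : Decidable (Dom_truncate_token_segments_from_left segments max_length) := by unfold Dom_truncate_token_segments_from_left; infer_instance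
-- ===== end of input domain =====

-- B is an alternative decomposition (forward cut-point search, then build); return values are proved equal everywhere.

-- ===== PORT A =====
-- A's `for segment in reversed(segments)` loop with `break`, as structural recursion
-- over the reversed list; state `cur` is A's running `new_length`.
def pvTruncA : List (List Int) → Int → Int → List (List Int)
  | [], _, _ => []
  | seg :: rest, max_length, cur =>
    let nl : Int := cur + seg.length
    if nl ≤ max_length then
      seg :: pvTruncA rest max_length nl
    else if nl - seg.length < max_length then
      -- rest_of_space = max_length - (new_length - len(segment)); segment[-rest_of_space:]
      [PySem.List.slice seg (some (-(max_length - (nl - seg.length)))) none]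
    else
      []

def truncate_token_segments_from_left (segments : List (List Int)) (max_length : Int) : List (List Int) :=
  (pvTruncA segments.reverse max_length 0).reverse

-- ===== PORT B =====
-- total = sum(len(s) for s in segments)
def pvTotalLen : List (List Int) → Int
  | [] => 0
  | s :: rest => (s.length : Int) + pvTotalLen rest

-- B's while loop: walk forward while the remaining suffix total exceeds the budget;
-- `prev` is segments[i-1] (none while i = 0); returns (prev, segments[i:], total).
def pvCut : Option (List Int) → List (List Int) → Int → Int → Option (List Int) × List (List Int) × Int
  | prev, [], total, _ => (prev, [], total)
  | prev, seg :: rest, total, max_length =>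
    if total > max_length then pvCut (some seg) rest (total - seg.length) max_length
    else (prev, seg :: rest, total)

def truncate_token_segments_from_left_alt (segments : List (List Int)) (max_length : Int) : List (List Int) :=
  match pvCut none segments (pvTotalLen segments) max_length with
  | (prev, suffix, total) =>
    match prev with
    | none => suffix
    | some p =>
      if total < max_length then
        PySem.List.slice p (some (-(max_length - total))) none :: suffix
      else suffix

-- ===== PRECONDITION & SPEC =====
def Spec_truncate_token_segments_from_left (segments : List (List Int)) (max_length : Int) (out : List (List Int)) : Prop := out = truncate_token_segments_from_left_alt segments max_length
instance (segments : List (List Int)) (max_length : Int) (out : List (List Int)) : Decidable (Spec_truncate_token_segments_from_left segments max_length out) := by unfold Spec_truncate_token_segments_from_left; infer_instance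

-- ===== CLAIM (what is proved, stated in full; the proofs are below) =====
def Claim_equal_truncate_token_segments_from_left : Prop := ∀ (segments : List (List Int)) (max_length : Int), Dom_truncate_token_segments_from_left segments max_length → Spec_truncate_token_segments_from_left segments max_length (truncate_token_segments_from_left segments max_length)

-- ===== LEMMAS AND PROOFS =====

theorem pvTotalLen_nonneg (l : List (List Int)) : 0 ≤ pvTotalLen l := by
  induction l with
  | nil => simp [pvTotalLen]
  | cons s rest ih => simp [pvTotalLen]; omega

theorem pvTotalLen_append (xs : List (List Int)) (seg : List Int) :
    pvTotalLen (xs ++ [seg]) = pvTotalLen xs + seg.length := by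
  induction xs with
  | nil => simp [pvTotalLen]
  | cons x rest ih => simp [pvTotalLen, ih]; ring

-- When the last segment fits (len ≤ m), the cut stops at or before it.
theorem pvCut_append_small (xs : List (List Int)) (seg : List Int) (prev : Option (List Int)) (m : Int)
    (h : (seg.length : Int) ≤ m) :
    pvCut prev (xs ++ [seg]) (pvTotalLen (xs ++ [seg])) m =
      (let r := pvCut prev xs (pvTotalLen xs) (m - seg.length)
       (r.1, r.2.1 ++ [seg], r.2.2 + seg.length)) := by
  induction xs generalizing prev with
  | nil =>
    simp [pvCut, pvTotalLen]
    omega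
  | cons x rest ih =>
    simp only [List.cons_append]
    have hT : pvTotalLen (x :: (rest ++ [seg])) = (x.length : Int) + pvTotalLen (rest ++ [seg]) := by
      simp [pvTotalLen]
    have hT2 : pvTotalLen (x :: rest) = (x.length : Int) + pvTotalLen rest := by
      simp [pvTotalLen]
    have hA := pvTotalLen_append rest seg
    by_cases hc : pvTotalLen (x :: (rest ++ [seg])) > m
    · have hc' : pvTotalLen (x :: rest) > m - seg.length := by omega
      simp only [pvCut, if_pos hc, if_pos hc']
      rw [show pvTotalLen (x :: (rest ++ [seg])) - (x.length : Int) = pvTotalLen (rest ++ [seg]) by omega,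
          show pvTotalLen (x :: rest) - (x.length : Int) = pvTotalLen rest by omega]
      exact ih (some x)
    · have hc' : ¬ pvTotalLen (x :: rest) > m - seg.length := by omega
      simp only [pvCut, if_neg hc, if_neg hc']
      refine Prod.ext rfl (Prod.ext rfl ?_)
      simp only
      omega

-- When the last segment alone exceeds the budget, the cut consumes everything.
theorem pvCut_append_big (xs : List (List Int)) (seg : List Int) (prev : Option (List Int)) (m : Int)
    (h : (seg.length : Int) > m) :
    pvCut prev (xs ++ [seg]) (pvTotalLen (xs ++ [seg])) m = (some seg, [], 0) := by
  induction xs generalizing prev with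
  | nil =>
    simp [pvCut, pvTotalLen]
    omega
  | cons x rest ih =>
    simp only [List.cons_append]
    have hT : pvTotalLen (x :: (rest ++ [seg])) = (x.length : Int) + pvTotalLen (rest ++ [seg]) := by
      simp [pvTotalLen]
    have hA := pvTotalLen_append rest seg
    have hn1 := pvTotalLen_nonneg rest
    have hn2 : (0:Int) ≤ (x.length : Int) := by positivity
    have hpos : pvTotalLen (x :: (rest ++ [seg])) > m := by omega
    simp only [pvCut, if_pos hpos]
    rw [show pvTotalLen (x :: (rest ++ [seg])) - (x.length : Int) = pvTotalLen (rest ++ [seg]) by omega]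
    exact ih (some x)

theorem alt_append_small (xs : List (List Int)) (seg : List Int) (m : Int)
    (h : (seg.length : Int) ≤ m) :
    truncate_token_segments_from_left_alt (xs ++ [seg]) m =
      truncate_token_segments_from_left_alt xs (m - seg.length) ++ [seg] := by
  unfold truncate_token_segments_from_left_alt
  rw [pvCut_append_small xs seg none m h]
  cases hr : pvCut none xs (pvTotalLen xs) (m - seg.length) with
  | mk p rest =>
    cases rest with
    | mk suf t =>
      cases p with
      | none => simp
      | some pp =>
        simp only
        by_cases ht : t + (seg.length : Int) < m
        · rw [if_pos ht, if_pos (by omega : t < m - seg.length)]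
          have : m - (t + (seg.length : Int)) = m - seg.length - t := by ring
          rw [this]
          simp
        · rw [if_neg ht, if_neg (by omega : ¬ t < m - seg.length)]

theorem alt_append_big (xs : List (List Int)) (seg : List Int) (m : Int)
    (h : (seg.length : Int) > m) :
    truncate_token_segments_from_left_alt (xs ++ [seg]) m =
      if 0 < m then [PySem.List.slice seg (some (-m)) none] else [] := by
  unfold truncate_token_segments_from_left_alt
  rw [pvCut_append_big xs seg none m h]
  simp only
  by_cases hm : 0 < m
  · rw [if_pos (by omega : (0:Int) < m), if_pos hm]
    norm_num
  · rw [if_neg (by omega : ¬ (0:Int) < m), if_neg hm]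

-- Main bridge: A's reversed-list recursion with accumulator `cur` equals
-- B's forward construction with budget m - cur.
theorem truncA_eq_alt (rs : List (List Int)) (m cur : Int) :
    (pvTruncA rs m cur).reverse = truncate_token_segments_from_left_alt rs.reverse (m - cur) := by
  induction rs generalizing cur with
  | nil =>
    simp [pvTruncA, truncate_token_segments_from_left_alt, pvCut, pvTotalLen]
  | cons seg rest ih =>
    simp only [pvTruncA, List.reverse_cons]
    by_cases h1 : cur + (seg.length : Int) ≤ m
    · rw [if_pos h1]
      rw [alt_append_small rest.reverse seg (m - cur) (by omega)]
      simp only [List.reverse_cons]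
      rw [ih (cur + seg.length)]
      have : m - cur - (seg.length : Int) = m - (cur + seg.length) := by ring
      rw [this]
    · rw [if_neg h1]
      rw [alt_append_big rest.reverse seg (m - cur) (by omega)]
      have hsimp : cur + (seg.length : Int) - seg.length = cur := by ring
      by_cases h2 : cur < m
      · rw [if_pos (by omega : cur + (seg.length : Int) - (seg.length:Int) < m),
            if_pos (by omega : (0:Int) < m - cur)]
        simp only [List.reverse_cons, List.reverse_nil, List.nil_append]
        have : m - (cur + (seg.length : Int) - seg.length) = m - cur := by ring
        rw [this]
      · rw [if_neg (by omega : ¬ cur + (seg.length : Int) - (seg.length:Int) < m),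
            if_neg (by omega : ¬ (0:Int) < m - cur)]
        simp

-- ===== VERDICT (by name: the statement is the Claim_ definition above) =====
theorem truncate_token_segments_from_left_spec : Claim_equal_truncate_token_segments_from_left := by
  intro segments max_length _
  unfold Spec_truncate_token_segments_from_left truncate_token_segments_from_left
  have := truncA_eq_alt segments.reverse max_length 0
  simpa using this
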